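-- pv_equiv track=rewrite | github.com/pkdism/reddit-daily-programmer | 363-easy-i-before-e.py | check
-- ===== SOURCE A (Python) =====
-- def check(s):
--     n = len(s)
--     if n < 2:
--         return True
--     elif n == 2 and s != "ei":
--         return True
--     for i in range(n-2):
--         if s[i+1] == 'e' and s[i+2] == 'i':
--             if s[i] == 'c':
--                 return True
--             else:
--                 return False
--         if s[i+1] == 'i' and s[i+2] == 'e':
--             if s[i] == 'c':
--                 return False
--             else:
--                 return True
--     return True
-- ===== SOURCE B (Python) =====
-- def check(s):
--     ans = True
--     for i in range(len(s) - 3, -1, -1):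
--         big = s[i+1:i+3]
--         if big in ('ei', 'ie'):
--             ans = (s[i] == 'c') == (big == 'ei')
--     return ans
-- ===== Notes on version B (the rewrite author's own statement) =====
-- stated objective: alternative
-- what changed: A scans forward with early returns, deciding at the first relevant bigram; B traverses the index range BACKWARDS with an overwriting accumulator (no early exit), comparing two-character slices, so the leftmost relevant trigram's decision is the last write and wins.
import Mathlib
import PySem

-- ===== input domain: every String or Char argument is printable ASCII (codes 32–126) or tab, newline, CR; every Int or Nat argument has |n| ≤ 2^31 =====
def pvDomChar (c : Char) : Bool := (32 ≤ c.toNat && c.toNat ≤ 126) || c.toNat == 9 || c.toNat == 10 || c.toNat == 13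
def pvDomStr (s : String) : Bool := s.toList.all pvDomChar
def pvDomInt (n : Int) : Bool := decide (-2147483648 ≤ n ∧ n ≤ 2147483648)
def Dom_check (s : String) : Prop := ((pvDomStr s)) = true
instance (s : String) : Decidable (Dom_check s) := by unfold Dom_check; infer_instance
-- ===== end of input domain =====

-- B replaces A's forward early-return scan by a BACKWARD traversal with an overwriting
-- accumulator over two-character slices: the leftmost relevant trigram is written last
-- and so decides (objective: alternative decomposition, same O(n) cost).

-- ===== PORT A =====
-- the 'for i in range(n-2)' loop with its early returns; the Python indices i, i+1, i+2
-- are always in range here (0 ≤ i ≤ n-3), so pyGetD with a dummy default is exact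
def checkLoop (cs : List Char) : List Int → Bool
  | [] => true
  | i :: rest =>
    if PySem.List.pyGetD cs (i+1) ' ' = 'e' ∧ PySem.List.pyGetD cs (i+2) ' ' = 'i' then
      (if PySem.List.pyGetD cs i ' ' = 'c' then true else false)
    else if PySem.List.pyGetD cs (i+1) ' ' = 'i' ∧ PySem.List.pyGetD cs (i+2) ' ' = 'e' then
      (if PySem.List.pyGetD cs i ' ' = 'c' then false else true)
    else checkLoop cs rest

def check (s : String) : Bool :=
  let cs := s.toList
  let n : Int := cs.length
  if n < 2 then true
  else if n = 2 ∧ s ≠ "ei" then true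
  else checkLoop cs (PySem.List.pyRange 0 (n-2) 1)

-- ===== PORT B =====
-- the loop body: big = s[i+1:i+3]; if big in ('ei','ie'): ans = (s[i]=='c') == (big=='ei')
-- (s[i] with 0 ≤ i ≤ n-3 is always in range, so pyGetD with a dummy default is exact)
def altStep (cs : List Char) (ans : Bool) (i : Int) : Bool :=
  let big := PySem.List.slice cs (some (i+1)) (some (i+3))
  if big = ['e','i'] ∨ big = ['i','e'] then
    ((PySem.List.pyGetD cs i ' ' == 'c') == (big == ['e','i']))
  else ans

def check_alt (s : String) : Bool :=
  let cs := s.toList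
  (PySem.List.pyRange ((cs.length : Int) - 3) (-1) (-1)).foldl (altStep cs) true

-- ===== PRECONDITION & SPEC =====
def Spec_check (s : String) (out : Bool) : Prop := out = check_alt s
instance (s : String) (out : Bool) : Decidable (Spec_check s out) := by unfold Spec_check; infer_instance

-- ===== CLAIM (what is proved, stated in full; the proofs are below) =====
def Claim_equal_check : Prop := ∀ (s : String), Dom_check s → Spec_check s (check s)

-- ===== LEMMAS AND PROOFS =====

-- the two-character slice s[k+1:k+3] at an in-range index, as explicit characters
theorem slice_pair (cs : List Char) (k : Nat) (h : k + 2 < cs.length) :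
    PySem.List.slice cs (some ((k : Int) + 1)) (some ((k : Int) + 3)) =
      [cs[k+1], cs[k+2]] := by
  have e1 : ((k : Int) + 1) = ((k+1 : Nat) : Int) := by push_cast; ring
  have e3 : ((k : Int) + 3) = ((k+3 : Nat) : Int) := by push_cast; ring
  rw [e1, e3, PySem.List.slice_natCast]
  have h1 : k + 1 < cs.length := by omega
  rw [show k + 3 - (k + 1) = 2 from by omega,
    List.drop_eq_getElem_cons h1, List.drop_eq_getElem_cons h,
    List.take_succ_cons, List.take_succ_cons, List.take_zero]

-- B's step at an in-range index is A's branch decision, else the accumulator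
theorem altStep_eq (cs : List Char) (X : Bool) (k : Nat) (h : k + 2 < cs.length) :
    altStep cs X (k : Int) =
      (if cs[k+1] = 'e' ∧ cs[k+2] = 'i' then (if cs[k] = 'c' then true else false)
       else if cs[k+1] = 'i' ∧ cs[k+2] = 'e' then (if cs[k] = 'c' then false else true)
       else X) := by
  have hk : k < cs.length := by omega
  by_cases e1 : cs[k+1] = 'e' <;> by_cases e2 : cs[k+2] = 'i' <;>
    by_cases e3 : cs[k+1] = 'i' <;> by_cases e4 : cs[k+2] = 'e' <;>
    by_cases hc : cs[k] = 'c' <;>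
    simp_all [altStep, slice_pair cs k h]

-- (nothing else uses the raw slice form)

-- folding B's step over the REVERSE of an ascending in-range index list is A's loop
theorem foldl_rev_eq_checkLoop (cs : List Char) (l : List Int)
    (hb : ∀ i ∈ l, ∃ k : Nat, i = (k : Int) ∧ k + 2 < cs.length) :
    l.reverse.foldl (altStep cs) true = checkLoop cs l := by
  induction l with
  | nil => simp [checkLoop]
  | cons i t ih =>
    obtain ⟨k, rfl, hk⟩ := hb i (List.mem_cons_self ..)
    have ih' := ih (fun j hj => hb j (List.mem_cons_of_mem _ hj))
    rw [List.reverse_cons, List.foldl_append]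
    simp only [List.foldl_cons, List.foldl_nil]
    rw [ih', altStep_eq cs _ k hk]
    have gd0 : PySem.List.pyGetD cs (k : Int) ' ' = cs[k]'(by omega) := by
      rw [PySem.List.pyGetD_natCast, List.getD_eq_getElem]
    have gd1 : PySem.List.pyGetD cs ((k : Int) + 1) ' ' = cs[k+1]'(by omega) := by
      rw [show ((k : Int) + 1) = ((k+1 : Nat) : Int) from by push_cast; ring,
        PySem.List.pyGetD_natCast, List.getD_eq_getElem]
    have gd2 : PySem.List.pyGetD cs ((k : Int) + 2) ' ' = cs[k+2]'(by omega) := by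
      rw [show ((k : Int) + 2) = ((k+2 : Nat) : Int) from by push_cast; ring,
        PySem.List.pyGetD_natCast, List.getD_eq_getElem]
    rw [show checkLoop cs ((k : Int) :: t) =
      (if PySem.List.pyGetD cs ((k:Int)+1) ' ' = 'e' ∧ PySem.List.pyGetD cs ((k:Int)+2) ' ' = 'i' then
        (if PySem.List.pyGetD cs (k:Int) ' ' = 'c' then true else false)
      else if PySem.List.pyGetD cs ((k:Int)+1) ' ' = 'i' ∧ PySem.List.pyGetD cs ((k:Int)+2) ' ' = 'e' then
        (if PySem.List.pyGetD cs (k:Int) ' ' = 'c' then false else true)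
      else checkLoop cs t) from by rw [checkLoop]]
    rw [gd0, gd1, gd2]

-- A's whole function is the loop over range(n-2): the short-string branches return
-- true exactly where that range is empty
theorem check_eq_checkLoop (s : String) :
    check s = checkLoop s.toList (PySem.List.pyRange 0 ((s.toList.length : Int) - 2) 1) := by
  simp only [check]
  split_ifs with h1 h2
  · rw [PySem.List.pyRange_one_eq_nil (by omega), checkLoop]
  · rw [PySem.List.pyRange_one_eq_nil (by omega), checkLoop]
  · rfl

-- ===== VERDICT (by name: the statement is the Claim_ definition above) =====
theorem check_spec : Claim_equal_check := by
  intro s _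
  unfold Spec_check
  rw [check_eq_checkLoop]
  show checkLoop s.toList (PySem.List.pyRange 0 ((s.toList.length : Int) - 2) 1) =
    (PySem.List.pyRange ((s.toList.length : Int) - 3) (-1) (-1)).foldl (altStep s.toList) true
  have hrev : PySem.List.pyRange ((s.toList.length : Int) - 3) (-1) (-1) =
      (PySem.List.pyRange 0 ((s.toList.length : Int) - 2) 1).reverse := by
    rw [PySem.List.pyRange_neg_one_eq_reverse,
      show ((-1 : Int) + 1) = 0 from by ring,
      show ((s.toList.length : Int) - 3 + 1) = (s.toList.length : Int) - 2 from by ring]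
  rw [hrev, foldl_rev_eq_checkLoop]
  intro i hi
  rw [PySem.List.mem_pyRange_one] at hi
  exact ⟨i.toNat, by omega, by omega⟩
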